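-- pv_equiv track=rewrite | github.com/abhinavsesh/Portfolio-Projects | File_Cleaner.py | get_destination_dir
-- ===== SOURCE A (Python) =====
-- dest_dirs = {
--     "audio_sfx": "/Users/AbhinavSesh/Downloads/AudioSFX",
--     "audio_music": "/Users/AbhinavSesh/Downloads/AudioMusic",
--     "video": "/Users/AbhinavSesh/Downloads/Videos",
--     "image": "/Users/AbhinavSesh/Downloads/Images",
--     "document": "/Users/AbhinavSesh/Downloads/Document",
-- }
--
-- file_extensions = {
--     "image": [".jpg", ".jpeg", ".png", ".gif", ".webp", ".tiff", ".psd", ".bmp", ".heif", ".svg", ".ico",".avif",".jfif"],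
--     "video": [".webm", ".mpg", ".mp4", ".avi", ".wmv", ".mov", ".flv"],
--     "audio": [".m4a", ".flac", ".mp3", ".wav", ".wma", ".aac"],
--     "document": [".doc", ".docx", ".odt", ".pdf", ".xls", ".xlsx", ".ppt", ".pptx"],
-- }
--
-- def get_destination_dir(name, size):
--     lower_name = name.lower()
--     for file_type, extensions in file_extensions.items():
--         if any(lower_name.endswith(ext) for ext in extensions):
--             if file_type == "audio":
--                 if size < 10_000_000 or "SFX" in lower_name:
--                     return dest_dirs["audio_sfx"]
--                 else:
--                     return dest_dirs["audio_music"]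
--             return dest_dirs[file_type]
--     return None
-- ===== SOURCE B (Python) =====
-- dest_dirs = {
--     "audio_sfx": "/Users/AbhinavSesh/Downloads/AudioSFX",
--     "audio_music": "/Users/AbhinavSesh/Downloads/AudioMusic",
--     "video": "/Users/AbhinavSesh/Downloads/Videos",
--     "image": "/Users/AbhinavSesh/Downloads/Images",
--     "document": "/Users/AbhinavSesh/Downloads/Document",
-- }
--
-- file_extensions = {
--     "image": [".jpg", ".jpeg", ".png", ".gif", ".webp", ".tiff", ".psd", ".bmp", ".heif", ".svg", ".ico", ".avif", ".jfif"],
--     "video": [".webm", ".mpg", ".mp4", ".avi", ".wmv", ".mov", ".flv"],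
--     "audio": [".m4a", ".flac", ".mp3", ".wav", ".wma", ".aac"],
--     "document": [".doc", ".docx", ".odt", ".pdf", ".xls", ".xlsx", ".ppt", ".pptx"],
-- }
--
-- # inverted index: extension -> file type, built once
-- EXT2TYPE = {ext: ftype for ftype, exts in file_extensions.items() for ext in exts}
--
--
-- def get_destination_dir(name, size):
--     lower_name = name.lower()
--     _, sep, tail = lower_name.rpartition(".")
--     file_type = EXT2TYPE.get(sep + tail) if sep else None
--     if file_type is None:
--         return None
--     if file_type == "audio":
--         if size < 10_000_000 or "sfx" in lower_name:
--             return dest_dirs["audio_sfx"]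
--         return dest_dirs["audio_music"]
--     return dest_dirs[file_type]
-- ===== Notes on version B (the rewrite author's own statement) =====
-- stated objective: idiomatic
-- what changed: Replaces the scan over all four extension lists with 34 endswith tests by a module-level inverted dict extension->type and a single rpartition-based extension extraction plus one dict lookup, and fixes the dead capital-'SFX' test to 'sfx'.
-- intended difference: On names with an audio extension whose lowercased form contains 'sfx' and size >= 10_000_000, A returns the audio_music dir because it tests capital 'SFX' against the already-lowercased name (a test that can never succeed), while B returns the audio_sfx dir, which is the evident intent of the test. — e.g. on get_destination_dir("Boom SFX.mp3", 10000000): A returns some "/Users/AbhinavSesh/Downloads/AudioMusic", B returns some "/Users/AbhinavSesh/Downloads/AudioSFX"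
import Mathlib
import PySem

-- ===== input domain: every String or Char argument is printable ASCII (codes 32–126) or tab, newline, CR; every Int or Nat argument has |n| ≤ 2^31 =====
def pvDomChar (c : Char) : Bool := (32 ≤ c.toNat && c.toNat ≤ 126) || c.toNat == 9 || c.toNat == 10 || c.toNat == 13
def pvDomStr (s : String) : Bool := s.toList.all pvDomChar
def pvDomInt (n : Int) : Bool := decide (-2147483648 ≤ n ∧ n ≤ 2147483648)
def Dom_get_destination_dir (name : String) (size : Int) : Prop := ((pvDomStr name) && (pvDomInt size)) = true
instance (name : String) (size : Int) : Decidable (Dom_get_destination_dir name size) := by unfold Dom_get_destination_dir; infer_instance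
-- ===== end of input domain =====

-- B replaces A's scan over four extension lists (34 endswith tests) by an inverted
-- extension->type dict plus one rpartition-based extension extraction, and fixes the
-- dead capital-'SFX' test (A tests 'SFX' against an already-lowercased name) to 'sfx'.


-- ===== PORT A =====
def pvDestDirs : PySem.Dict String String :=
  ⟨[("audio_sfx", "/Users/AbhinavSesh/Downloads/AudioSFX"),
    ("audio_music", "/Users/AbhinavSesh/Downloads/AudioMusic"),
    ("video", "/Users/AbhinavSesh/Downloads/Videos"),
    ("image", "/Users/AbhinavSesh/Downloads/Images"),
    ("document", "/Users/AbhinavSesh/Downloads/Document")]⟩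

def pvFileExtensions : List (String × List String) :=
  [("image", [".jpg", ".jpeg", ".png", ".gif", ".webp", ".tiff", ".psd", ".bmp", ".heif", ".svg", ".ico", ".avif", ".jfif"]),
   ("video", [".webm", ".mpg", ".mp4", ".avi", ".wmv", ".mov", ".flv"]),
   ("audio", [".m4a", ".flac", ".mp3", ".wav", ".wma", ".aac"]),
   ("document", [".doc", ".docx", ".odt", ".pdf", ".xls", ".xlsx", ".ppt", ".pptx"])]

-- the 'for file_type, extensions in file_extensions.items():' loop of A
def pvALoop (lower_name : String) (size : Int) : List (String × List String) → Option String
  | [] => none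
  | (file_type, extensions) :: rest =>
    if extensions.any (fun ext => PySem.Str.endswith lower_name ext) then
      if file_type == "audio" then
        if decide (size < 10000000) || PySem.Str.isIn "SFX" lower_name then
          PySem.Dict.get? pvDestDirs "audio_sfx"
        else
          PySem.Dict.get? pvDestDirs "audio_music"
      else
        PySem.Dict.get? pvDestDirs file_type
    else pvALoop lower_name size rest

def get_destination_dir (name : String) (size : Int) : Option String :=
  pvALoop (PySem.Str.lower name) size pvFileExtensions

-- ===== PORT B =====
-- hand port of the part of str.rpartition('.') that B uses: the characters after the
-- LAST '.', or none when no '.' occurs (exact: rpartition splits at the last occurrence)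
def pvAfterLastDot : List Char → Option (List Char)
  | [] => none
  | c :: rest =>
    match pvAfterLastDot rest with
    | some t => some t
    | none => if c = '.' then some rest else none

-- B's module-level inverted index EXT2TYPE (keys kept as char lists)
def pvExt2Type : PySem.Dict (List Char) String :=
  ⟨[(".jpg".toList, "image"), (".jpeg".toList, "image"), (".png".toList, "image"),
    (".gif".toList, "image"), (".webp".toList, "image"), (".tiff".toList, "image"),
    (".psd".toList, "image"), (".bmp".toList, "image"), (".heif".toList, "image"),
    (".svg".toList, "image"), (".ico".toList, "image"), (".avif".toList, "image"),
    (".jfif".toList, "image"),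
    (".webm".toList, "video"), (".mpg".toList, "video"), (".mp4".toList, "video"),
    (".avi".toList, "video"), (".wmv".toList, "video"), (".mov".toList, "video"),
    (".flv".toList, "video"),
    (".m4a".toList, "audio"), (".flac".toList, "audio"), (".mp3".toList, "audio"),
    (".wav".toList, "audio"), (".wma".toList, "audio"), (".aac".toList, "audio"),
    (".doc".toList, "document"), (".docx".toList, "document"), (".odt".toList, "document"),
    (".pdf".toList, "document"), (".xls".toList, "document"), (".xlsx".toList, "document"),
    (".ppt".toList, "document"), (".pptx".toList, "document")]⟩

def get_destination_dir_alt (name : String) (size : Int) : Option String :=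
  let lower_name := PySem.Str.lower name
  let file_type : Option String :=
    match pvAfterLastDot lower_name.toList with
    | none => none
    | some tail => PySem.Dict.get? pvExt2Type ('.' :: tail)
  match file_type with
  | none => none
  | some ft =>
    if ft == "audio" then
      if decide (size < 10000000) || PySem.Str.isIn "sfx" lower_name then
        PySem.Dict.get? pvDestDirs "audio_sfx"
      else
        PySem.Dict.get? pvDestDirs "audio_music"
    else
      PySem.Dict.get? pvDestDirs ft

-- ===== PRECONDITION & SPEC =====
-- On names with an audio extension whose lowercased form contains "sfx" and size ≥ 10_000_000,
-- A returns the audio_music dir because it tests capital "SFX" against the already-lowercased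
-- name (a test that can never succeed), while B returns the audio_sfx dir, the evident intent.
def D_get_destination_dir (name : String) (size : Int) : Prop :=
  ([".m4a", ".flac", ".mp3", ".wav", ".wma", ".aac"].any
      (fun e => PySem.Str.endswith (PySem.Str.lower name) e)) = true
  ∧ 10000000 ≤ size
  ∧ PySem.Str.isIn "sfx" (PySem.Str.lower name) = true
instance (name : String) (size : Int) : Decidable (D_get_destination_dir name size) := by
  unfold D_get_destination_dir; infer_instance

def Spec_get_destination_dir (name : String) (size : Int) (out : Option String) : Prop :=
  ¬ D_get_destination_dir name size → out = get_destination_dir_alt name size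
instance (name : String) (size : Int) (out : Option String) : Decidable (Spec_get_destination_dir name size out) := by
  unfold Spec_get_destination_dir; infer_instance

def pvDiffWitness_get_destination_dir : String × Int := ("Boom SFX.mp3", 10000000)
def pvDiffWitnessOut_get_destination_dir : (Option String) × (Option String) :=
  (some "/Users/AbhinavSesh/Downloads/AudioMusic", some "/Users/AbhinavSesh/Downloads/AudioSFX")

-- ===== CLAIM (what is proved, stated in full; the proofs are below) =====
def Claim_unchanged_get_destination_dir : Prop := ∀ (name : String) (size : Int), Dom_get_destination_dir name size → Spec_get_destination_dir name size (get_destination_dir name size)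
def Claim_changed_get_destination_dir : Prop := Dom_get_destination_dir (pvDiffWitness_get_destination_dir.1) (pvDiffWitness_get_destination_dir.2) ∧ D_get_destination_dir (pvDiffWitness_get_destination_dir.1) (pvDiffWitness_get_destination_dir.2) ∧ get_destination_dir (pvDiffWitness_get_destination_dir.1) (pvDiffWitness_get_destination_dir.2) = pvDiffWitnessOut_get_destination_dir.1 ∧ get_destination_dir_alt (pvDiffWitness_get_destination_dir.1) (pvDiffWitness_get_destination_dir.2) = pvDiffWitnessOut_get_destination_dir.2 ∧ pvDiffWitnessOut_get_destination_dir.1 ≠ pvDiffWitnessOut_get_destination_dir.2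
def Claim_exact_get_destination_dir : Prop := ∀ (name : String) (size : Int), Dom_get_destination_dir name size → D_get_destination_dir name size → get_destination_dir name size ≠ get_destination_dir_alt name size

-- ===== LEMMAS AND PROOFS =====

theorem pvAfterLastDot_of_no_dot (cs : List Char) (h : '.' ∉ cs) : pvAfterLastDot cs = none := by
  induction cs with
  | nil => rfl
  | cons c rest ih =>
    simp only [List.mem_cons, not_or] at h
    have hc : ¬ c = '.' := fun e => h.1 e.symm
    simp [pvAfterLastDot, ih h.2, hc]

theorem pvEnds_iff (cs l : List Char) (hc : '.' ∉ cs) :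
    ('.' :: cs) <:+ l ↔ pvAfterLastDot l = some cs := by
  induction l with
  | nil => simp [pvAfterLastDot, List.suffix_nil]
  | cons c rest ih =>
    rw [List.suffix_cons_iff]
    cases h : pvAfterLastDot rest with
    | some t =>
      simp only [pvAfterLastDot, h]
      constructor
      · rintro (he | hs)
        · injection he with h1 h2
          subst h2
          rw [pvAfterLastDot_of_no_dot cs hc] at h
          exact absurd h (by simp)
        · exact h ▸ ih.mp hs
      · intro ht
        exact Or.inr (ih.mpr (h.trans ht))
    | none =>
      simp only [pvAfterLastDot, h]
      constructor
      · rintro (he | hs)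
        · injection he with h1 h2
          subst h1; subst h2; simp
        · rw [ih, h] at hs; cases hs
      · intro ht
        split at ht
        · next hdot =>
          injection ht with h2
          subst h2; subst hdot
          exact Or.inl rfl
        · cases ht

theorem pvEnds_bool_chars (l cs : List Char) (hc : '.' ∉ cs) :
    PySem.Chars.endswith l ('.' :: cs) = decide (pvAfterLastDot l = some cs) := by
  rcases h : PySem.Chars.endswith l ('.' :: cs) with _ | _
  · have hn : ¬ ('.' :: cs) <:+ l := fun hs =>
      by rw [(PySem.Chars.endswith_iff _ _).mpr hs] at h; cases h
    rw [(pvEnds_iff cs l hc).not] at hn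
    simp [hn]
  · have := (PySem.Chars.endswith_iff _ _).mp h
    rw [pvEnds_iff cs l hc] at this
    simp [this]

theorem pvEnds_bool (lower e : String) (cs : List Char)
    (he : e.toList = '.' :: cs) (hc : '.' ∉ cs) :
    PySem.Str.endswith lower e = decide (pvAfterLastDot lower.toList = some cs) := by
  rw [PySem.Str.endswith_eq, he]
  rcases h : PySem.Chars.endswith lower.toList ('.' :: cs) with _ | _
  · have : ¬ ('.' :: cs) <:+ lower.toList := fun hs =>
      by rw [(PySem.Chars.endswith_iff _ _).mpr hs] at h; cases h
    rw [(pvEnds_iff cs lower.toList hc).not] at this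
    simp [this]
  · have := (PySem.Chars.endswith_iff _ _).mp h
    rw [pvEnds_iff cs lower.toList hc] at this
    simp [this]

theorem pvLowerChar_ne_S (c : Char) : PySem.Chars.lowerChar c ≠ 'S' := by
  unfold PySem.Chars.lowerChar PySem.Chars.isupper
  split_ifs with h
  · simp only [Bool.and_eq_true, decide_eq_true_eq] at h
    have h1 : 65 ≤ c.toNat := h.1
    have h2 : c.toNat ≤ 90 := h.2
    have hv : (c.toNat + 32).isValidChar := Or.inl (by omega)
    have ht : (Char.ofNat (c.toNat + 32)).toNat = c.toNat + 32 := by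
      rw [Char.toNat_ofNat, if_pos hv]
    intro hEq
    rw [hEq] at ht
    have : ('S' : Char).toNat = 83 := by decide
    omega
  · simp only [Bool.and_eq_true, decide_eq_true_eq, not_and] at h
    intro hEq; subst hEq
    exact absurd (h (by decide)) (by decide)

theorem pvSFX_false (name : String) : PySem.Str.isIn "SFX" (PySem.Str.lower name) = false := by
  rw [PySem.Str.isIn_eq]
  apply (PySem.Chars.isIn_eq_false_iff _ _).mpr
  intro hinf
  have hmem : 'S' ∈ (PySem.Str.lower name).toList := hinf.subset (by decide)
  rw [PySem.Str.toList_lower] at hmem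
  simp only [PySem.Chars.lower, List.mem_map] at hmem
  obtain ⟨x, _, hx⟩ := hmem
  exact pvLowerChar_ne_S x hx

-- classification of the lowered extension tail (the text after the last '.')
def pvClassify (t : List Char) : Option String :=
  if t ∈ ["jpg".toList, "jpeg".toList, "png".toList, "gif".toList, "webp".toList, "tiff".toList,
          "psd".toList, "bmp".toList, "heif".toList, "svg".toList, "ico".toList, "avif".toList,
          "jfif".toList] then some "image"
  else if t ∈ ["webm".toList, "mpg".toList, "mp4".toList, "avi".toList, "wmv".toList,
               "mov".toList, "flv".toList] then some "video"
  else if t ∈ ["m4a".toList, "flac".toList, "mp3".toList, "wav".toList, "wma".toList,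
               "aac".toList] then some "audio"
  else if t ∈ ["doc".toList, "docx".toList, "odt".toList, "pdf".toList, "xls".toList,
               "xlsx".toList, "ppt".toList, "pptx".toList] then some "document"
  else none

-- the common shape both ports reduce to; sfxPat is "SFX" for A, "sfx" for B
def pvShape (name : String) (size : Int) (sfxPat : String) : Option String :=
  match pvAfterLastDot (PySem.Str.lower name).toList with
  | none => none
  | some t =>
    match pvClassify t with
    | none => none
    | some ft =>
      if ft == "audio" then
        if decide (size < 10000000) || PySem.Str.isIn sfxPat (PySem.Str.lower name) then
          PySem.Dict.get? pvDestDirs "audio_sfx"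
        else
          PySem.Dict.get? pvDestDirs "audio_music"
      else
        PySem.Dict.get? pvDestDirs ft

theorem pvGet_classify (t : List Char) :
    PySem.Dict.get? pvExt2Type ('.' :: t) = pvClassify t := by
  by_cases h1 : t ∈ ["jpg".toList, "jpeg".toList, "png".toList, "gif".toList, "webp".toList, "tiff".toList, "psd".toList, "bmp".toList, "heif".toList, "svg".toList, "ico".toList, "avif".toList, "jfif".toList]
  · fin_cases h1 <;> decide
  by_cases h2 : t ∈ ["webm".toList, "mpg".toList, "mp4".toList, "avi".toList, "wmv".toList, "mov".toList, "flv".toList]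
  · fin_cases h2 <;> decide
  by_cases h3 : t ∈ ["m4a".toList, "flac".toList, "mp3".toList, "wav".toList, "wma".toList, "aac".toList]
  · fin_cases h3 <;> decide
  by_cases h4 : t ∈ ["doc".toList, "docx".toList, "odt".toList, "pdf".toList, "xls".toList, "xlsx".toList, "ppt".toList, "pptx".toList]
  · fin_cases h4 <;> decide
  have hkeys : pvExt2Type.keys = [('.' :: "jpg".toList), ('.' :: "jpeg".toList), ('.' :: "png".toList), ('.' :: "gif".toList), ('.' :: "webp".toList), ('.' :: "tiff".toList), ('.' :: "psd".toList), ('.' :: "bmp".toList), ('.' :: "heif".toList), ('.' :: "svg".toList), ('.' :: "ico".toList), ('.' :: "avif".toList), ('.' :: "jfif".toList), ('.' :: "webm".toList), ('.' :: "mpg".toList), ('.' :: "mp4".toList), ('.' :: "avi".toList), ('.' :: "wmv".toList), ('.' :: "mov".toList), ('.' :: "flv".toList), ('.' :: "m4a".toList), ('.' :: "flac".toList), ('.' :: "mp3".toList), ('.' :: "wav".toList), ('.' :: "wma".toList), ('.' :: "aac".toList), ('.' :: "doc".toList), ('.' :: "docx".toList), ('.' :: "odt".toList), ('.' :: "pdf".toList),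 ('.' :: "xls".toList), ('.' :: "xlsx".toList), ('.' :: "ppt".toList), ('.' :: "pptx".toList)] := by decide
  have hget : pvExt2Type.get? ('.' :: t) = none := by
    rw [PySem.Dict.get?_eq_none_iff_not_mem_keys, hkeys]
    simp only [List.mem_cons, List.cons.injEq, true_and, List.not_mem_nil, or_false]
    simp at h1 h2 h3 h4
    simp_all
  rw [hget]
  simp at h1 h2 h3 h4
  simp [pvClassify, h1, h2, h3, h4]

theorem pvA_char (name : String) (size : Int) :
    get_destination_dir name size = pvShape name size "SFX" := by
  unfold get_destination_dir pvShape pvFileExtensions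
  set lower := PySem.Str.lower name with hl
  simp only [pvALoop, List.any_cons, List.any_nil, Bool.or_false]
  rw [pvEnds_bool lower ".jpg" "jpg".toList (by decide) (by decide)]
  rw [pvEnds_bool lower ".jpeg" "jpeg".toList (by decide) (by decide)]
  rw [pvEnds_bool lower ".png" "png".toList (by decide) (by decide)]
  rw [pvEnds_bool lower ".gif" "gif".toList (by decide) (by decide)]
  rw [pvEnds_bool lower ".webp" "webp".toList (by decide) (by decide)]
  rw [pvEnds_bool lower ".tiff" "tiff".toList (by decide) (by decide)]
  rw [pvEnds_bool lower ".psd" "psd".toList (by decide) (by decide)]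
  rw [pvEnds_bool lower ".bmp" "bmp".toList (by decide) (by decide)]
  rw [pvEnds_bool lower ".heif" "heif".toList (by decide) (by decide)]
  rw [pvEnds_bool lower ".svg" "svg".toList (by decide) (by decide)]
  rw [pvEnds_bool lower ".ico" "ico".toList (by decide) (by decide)]
  rw [pvEnds_bool lower ".avif" "avif".toList (by decide) (by decide)]
  rw [pvEnds_bool lower ".jfif" "jfif".toList (by decide) (by decide)]
  rw [pvEnds_bool lower ".webm" "webm".toList (by decide) (by decide)]
  rw [pvEnds_bool lower ".mpg" "mpg".toList (by decide) (by decide)]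
  rw [pvEnds_bool lower ".mp4" "mp4".toList (by decide) (by decide)]
  rw [pvEnds_bool lower ".avi" "avi".toList (by decide) (by decide)]
  rw [pvEnds_bool lower ".wmv" "wmv".toList (by decide) (by decide)]
  rw [pvEnds_bool lower ".mov" "mov".toList (by decide) (by decide)]
  rw [pvEnds_bool lower ".flv" "flv".toList (by decide) (by decide)]
  rw [pvEnds_bool lower ".m4a" "m4a".toList (by decide) (by decide)]
  rw [pvEnds_bool lower ".flac" "flac".toList (by decide) (by decide)]
  rw [pvEnds_bool lower ".mp3" "mp3".toList (by decide) (by decide)]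
  rw [pvEnds_bool lower ".wav" "wav".toList (by decide) (by decide)]
  rw [pvEnds_bool lower ".wma" "wma".toList (by decide) (by decide)]
  rw [pvEnds_bool lower ".aac" "aac".toList (by decide) (by decide)]
  rw [pvEnds_bool lower ".doc" "doc".toList (by decide) (by decide)]
  rw [pvEnds_bool lower ".docx" "docx".toList (by decide) (by decide)]
  rw [pvEnds_bool lower ".odt" "odt".toList (by decide) (by decide)]
  rw [pvEnds_bool lower ".pdf" "pdf".toList (by decide) (by decide)]
  rw [pvEnds_bool lower ".xls" "xls".toList (by decide) (by decide)]
  rw [pvEnds_bool lower ".xlsx" "xlsx".toList (by decide) (by decide)]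
  rw [pvEnds_bool lower ".ppt" "ppt".toList (by decide) (by decide)]
  rw [pvEnds_bool lower ".pptx" "pptx".toList (by decide) (by decide)]
  cases h : pvAfterLastDot lower.toList with
  | none => simp [h]
  | some t =>
    simp only [h, Option.some.injEq]
    by_cases h1 : t ∈ ["jpg".toList, "jpeg".toList, "png".toList, "gif".toList, "webp".toList, "tiff".toList, "psd".toList, "bmp".toList, "heif".toList, "svg".toList, "ico".toList, "avif".toList, "jfif".toList]
    · simp only [pvClassify, if_pos h1]
      fin_cases h1 <;> simp
    by_cases h2 : t ∈ ["webm".toList, "mpg".toList, "mp4".toList, "avi".toList, "wmv".toList, "mov".toList, "flv".toList]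
    · simp only [pvClassify, if_neg h1, if_pos h2]
      fin_cases h2 <;> simp
    by_cases h3 : t ∈ ["m4a".toList, "flac".toList, "mp3".toList, "wav".toList, "wma".toList, "aac".toList]
    · simp only [pvClassify, if_neg h1, if_neg h2, if_pos h3]
      fin_cases h3 <;> simp
    by_cases h4 : t ∈ ["doc".toList, "docx".toList, "odt".toList, "pdf".toList, "xls".toList, "xlsx".toList, "ppt".toList, "pptx".toList]
    · simp only [pvClassify, if_neg h1, if_neg h2, if_neg h3, if_pos h4]
      fin_cases h4 <;> simp
    simp at h1 h2 h3 h4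
    simp [pvClassify, h1, h2, h3, h4]

theorem pvB_char (name : String) (size : Int) :
    get_destination_dir_alt name size = pvShape name size "sfx" := by
  unfold get_destination_dir_alt pvShape
  cases h : pvAfterLastDot (PySem.Chars.lower name.toList) with
  | none => simp [PySem.Str.toList_lower, h]
  | some t => simp only [PySem.Str.toList_lower, h, pvGet_classify]


theorem pvAudio_any (name : String) (t : List Char)
    (h : pvAfterLastDot (PySem.Str.lower name).toList = some t)
    (ht : t ∈ ["m4a".toList, "flac".toList, "mp3".toList, "wav".toList, "wma".toList, "aac".toList]) :
    ([".m4a", ".flac", ".mp3", ".wav", ".wma", ".aac"].any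
        (fun e => PySem.Str.endswith (PySem.Str.lower name) e)) = true := by
  have h' : pvAfterLastDot (PySem.Chars.lower name.toList) = some t := by
    rwa [PySem.Str.toList_lower] at h
  simp only [List.any_cons, List.any_nil, Bool.or_false, Bool.or_eq_true]
  fin_cases ht <;>
    simp [pvEnds_bool_chars (PySem.Chars.lower name.toList) ['m', '4', 'a'] (by decide),
    pvEnds_bool_chars (PySem.Chars.lower name.toList) ['f', 'l', 'a', 'c'] (by decide),
    pvEnds_bool_chars (PySem.Chars.lower name.toList) ['m', 'p', '3'] (by decide),
    pvEnds_bool_chars (PySem.Chars.lower name.toList) ['w', 'a', 'v'] (by decide),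
    pvEnds_bool_chars (PySem.Chars.lower name.toList) ['w', 'm', 'a'] (by decide),
    pvEnds_bool_chars (PySem.Chars.lower name.toList) ['a', 'a', 'c'] (by decide), h']

theorem pvAudio_tail (name : String)
    (hany : ([".m4a", ".flac", ".mp3", ".wav", ".wma", ".aac"].any
        (fun e => PySem.Str.endswith (PySem.Str.lower name) e)) = true) :
    ∃ t, pvAfterLastDot (PySem.Str.lower name).toList = some t ∧ t ∈ ["m4a".toList, "flac".toList, "mp3".toList, "wav".toList, "wma".toList, "aac".toList] := by
  simp [List.any_cons, List.any_nil, Bool.or_false, Bool.or_eq_true,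
    PySem.Str.endswith_eq, PySem.Str.toList_lower,
    pvEnds_bool_chars (PySem.Chars.lower name.toList) ['m', '4', 'a'] (by decide),
    pvEnds_bool_chars (PySem.Chars.lower name.toList) ['f', 'l', 'a', 'c'] (by decide),
    pvEnds_bool_chars (PySem.Chars.lower name.toList) ['m', 'p', '3'] (by decide),
    pvEnds_bool_chars (PySem.Chars.lower name.toList) ['w', 'a', 'v'] (by decide),
    pvEnds_bool_chars (PySem.Chars.lower name.toList) ['w', 'm', 'a'] (by decide),
    pvEnds_bool_chars (PySem.Chars.lower name.toList) ['a', 'a', 'c'] (by decide),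
    decide_eq_true_eq] at hany
  rcases hany with h|h|h|h|h|h <;>
    exact ⟨_, by rw [PySem.Str.toList_lower]; exact h, by simp⟩

theorem pvClassify_audio (t : List Char) (h : pvClassify t = some "audio") :
    t ∈ ["m4a".toList, "flac".toList, "mp3".toList, "wav".toList, "wma".toList, "aac".toList] := by
  unfold pvClassify at h
  split_ifs at h <;> simp_all

-- ===== VERDICT (by name: the statement is the Claim_ definition above) =====
theorem get_destination_dir_spec : Claim_unchanged_get_destination_dir := by
  intro name size _hdom
  unfold Spec_get_destination_dir
  intro hnD
  rw [pvA_char, pvB_char]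
  unfold pvShape
  cases h : pvAfterLastDot (PySem.Str.lower name).toList with
  | none => simp [h]
  | some t =>
    simp only [h]
    cases hc : pvClassify t with
    | none => simp [hc]
    | some ft =>
      simp only [hc]
      by_cases hft : ft = "audio"
      · subst hft
        have hS : PySem.Chars.isIn ['S', 'F', 'X'] (PySem.Chars.lower name.toList) = false := by
          simpa [PySem.Str.isIn_eq, PySem.Str.toList_lower] using pvSFX_false name
        by_cases hs : size < 10000000
        · simp [hs]
        · by_cases hx : PySem.Str.isIn "sfx" (PySem.Str.lower name) = true
          · exact absurd ⟨pvAudio_any name t h (pvClassify_audio t hc), by omega, hx⟩ hnD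
          · have hx' : PySem.Chars.isIn ['s', 'f', 'x'] (PySem.Chars.lower name.toList) = false := by
              simpa [PySem.Str.isIn_eq, PySem.Str.toList_lower, Bool.not_eq_true] using hx
            simp [hs, hx', hS]
      · simp [hft]

theorem get_destination_dir_changed : Claim_changed_get_destination_dir := by
  unfold Claim_changed_get_destination_dir; decide

theorem get_destination_dir_tight : Claim_exact_get_destination_dir := by
  intro name size _hdom hD
  obtain ⟨hany, hsize, hsfx⟩ := hD
  obtain ⟨t, h, ht⟩ := pvAudio_tail name hany
  rw [pvA_char, pvB_char]
  unfold pvShape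
  have hcl : pvClassify t = some "audio" := by fin_cases ht <;> decide
  have hS : PySem.Chars.isIn ['S', 'F', 'X'] (PySem.Chars.lower name.toList) = false := by
    simpa [PySem.Str.isIn_eq, PySem.Str.toList_lower] using pvSFX_false name
  have hx' : PySem.Chars.isIn ['s', 'f', 'x'] (PySem.Chars.lower name.toList) = true := by
    simpa [PySem.Str.isIn_eq, PySem.Str.toList_lower] using hsfx
  have hns : ¬ size < 10000000 := by omega
  rw [PySem.Str.toList_lower] at h
  simp [h, hcl, hS, hx', hns]
  decide
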